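-- pv_equiv track=rewrite | github.com/daniel-reich/ubiquitous-fiesta | 4xZFisQX8NnYB3nv4_11.py | maximum_seating
-- ===== SOURCE A (Python) =====
-- def maximum_seating(lst):
--     ans = 0
--     n = len(lst)
--     for i in range(n):
--         if lst[i] == 0 and 1 not in lst[max(0, i-2):min(n, i+3)]:
--             ans += 1
--             lst[i] = 1
--     return ans
-- ===== SOURCE B (Python) =====
-- def maximum_seating(lst):
--     # Stage 1 (right-to-left): blocked[i] is True iff an original 1 sits at i+1 or i+2.
--     # Stage 2 (fold over zip): count seats with a cooldown counter; no mutation of lst.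
--     n = len(lst)
--     blocked = [False] * n
--     nxt = None  # index of the nearest 1 strictly to the right of i
--     for i in range(n - 1, -1, -1):
--         blocked[i] = nxt is not None and nxt - i <= 2
--         if lst[i] == 1:
--             nxt = i
--     ans = 0
--     cool = 0  # how many upcoming positions are still too close to the last occupied seat
--     for x, b in zip(lst, blocked):
--         if x == 1:
--             cool = 2
--         elif cool == 0 and x == 0 and not b:
--             ans += 1
--             cool = 2
--         elif cool:
--             cool -= 1
--     return ans
-- ===== Notes on version B (the rewrite author's own statement) =====
-- stated objective: alternative
-- what changed: Replaces A's single in-place pass with a 5-wide slice membership test by two staged pure passes: a right-to-left precomputation of which positions have an original 1 within the next two seats, then a left-to-right fold over the zipped list with a decrementing cooldown counter; B never mutates lst.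
import Mathlib
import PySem

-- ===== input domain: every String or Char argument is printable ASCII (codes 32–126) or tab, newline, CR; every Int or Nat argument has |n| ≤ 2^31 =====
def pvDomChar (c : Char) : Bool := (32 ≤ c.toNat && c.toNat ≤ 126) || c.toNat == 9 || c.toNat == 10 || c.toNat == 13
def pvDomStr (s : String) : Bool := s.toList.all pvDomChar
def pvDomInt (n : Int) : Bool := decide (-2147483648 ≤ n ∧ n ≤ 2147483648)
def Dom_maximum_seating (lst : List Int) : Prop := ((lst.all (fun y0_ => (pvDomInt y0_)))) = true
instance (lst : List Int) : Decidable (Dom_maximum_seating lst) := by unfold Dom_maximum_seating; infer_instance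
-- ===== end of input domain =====

-- B replaces A's single mutating pass with slice-membership tests by two staged pure passes
-- (a right-to-left blocked-ahead precomputation, then a fold over the zip with a cooldown
-- counter); objective: alternative. A mutates lst in place; B does not — the equivalence
-- proved here is about the RETURN value only.

-- ===== PORT A =====
-- lst[i] = 1 with 0 ≤ i < len(lst) never raises; it is exact as List.set.
def msA_loop (n : Nat) (i : Nat) (l : List Int) (ans : Int) : Int :=
  if h : i < n then
    if PySem.List.pyGet? l (i : Int) = some 0 ∧
        (1 : Int) ∉ PySem.List.slice l (some (max 0 ((i : Int) - 2))) (some (min (n : Int) ((i : Int) + 3))) then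
      msA_loop n (i + 1) (l.set i 1) (ans + 1)
    else
      msA_loop n (i + 1) l ans
  else ans
  termination_by n - i

def maximum_seating (lst : List Int) : Int := msA_loop lst.length 0 lst 0

-- ===== PORT B =====
-- Stage 1 of Source B: the descending loop filling blocked[]; i counts the indices still to
-- process, nxt is the index of the nearest original 1 strictly to the right (None = none).
def msB_blocked (lst : List Int) : Nat → Option Nat → List Bool → List Bool
  | 0, _, acc => acc
  | i' + 1, nxt, acc =>
    msB_blocked lst i' (if lst[i']? = some 1 then some i' else nxt)
      ((match nxt with | none => false | some j => decide (j - i' ≤ 2)) :: acc)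

-- Stage 2 of Source B: the fold over zip(lst, blocked) with the cooldown counter
-- ('elif cool: cool -= 1' is exactly Nat subtraction).
def msB_count : List (Int × Bool) → Nat → Int → Int
  | [], _, ans => ans
  | (x, b) :: rest, cool, ans =>
    if x = 1 then msB_count rest 2 ans
    else if cool = 0 ∧ x = 0 ∧ b = false then msB_count rest 2 (ans + 1)
    else msB_count rest (cool - 1) ans

def maximum_seating_alt (lst : List Int) : Int :=
  msB_count (lst.zip (msB_blocked lst lst.length none [])) 0 0

-- ===== PRECONDITION & SPEC =====
def Spec_maximum_seating (lst : List Int) (out : Int) : Prop := out = maximum_seating_alt lst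
instance (lst : List Int) (out : Int) : Decidable (Spec_maximum_seating lst out) := by unfold Spec_maximum_seating; infer_instance

-- ===== CLAIM (what is proved, stated in full; the proofs are below) =====
def Claim_equal_maximum_seating : Prop := ∀ (lst : List Int), Dom_maximum_seating lst → Spec_maximum_seating lst (maximum_seating lst)

-- ===== LEMMAS AND PROOFS =====

-- Proof-side intermediate: A's loop rephrased with a maintained last-occupied index.
def msI_loop (lst : List Int) (n : Nat) (i : Nat) (last : Int) (ans : Int) : Int :=
  if h : i < n then
    if PySem.List.pyGet? lst (i : Int) = some 1 then
      msI_loop lst n (i + 1) (i : Int) ans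
    else if PySem.List.pyGet? lst (i : Int) = some 0 ∧ (i : Int) - last > 2 ∧
        ((i : Int) + 1 ≥ (n : Int) ∨ PySem.List.pyGet? lst ((i : Int) + 1) ≠ some 1) ∧
        ((i : Int) + 2 ≥ (n : Int) ∨ PySem.List.pyGet? lst ((i : Int) + 2) ≠ some 1) then
      msI_loop lst n (i + 1) (i : Int) (ans + 1)
    else
      msI_loop lst n (i + 1) last ans
  else ans
  termination_by n - i

lemma mem_take_drop (x : Int) (l : List Int) (a k : Nat) :
    x ∈ (l.drop a).take k ↔ ∃ j : Nat, a ≤ j ∧ j < a + k ∧ l[j]? = some x := by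
  constructor
  · intro hx
    obtain ⟨m, hm, he⟩ := List.mem_iff_getElem.mp hx
    have hml : m < k ∧ a + m < l.length := by
      simp [List.length_take, List.length_drop] at hm; omega
    refine ⟨a + m, by omega, by omega, ?_⟩
    rw [List.getElem?_eq_getElem (by omega), ← he, List.getElem_take, List.getElem_drop]
  · rintro ⟨j, hja, hjk, hj⟩
    have hjl : j < l.length := by
      by_contra hc
      simp [List.getElem?_eq_none (by omega : l.length ≤ j)] at hj
    rw [List.getElem?_eq_getElem hjl] at hj
    have hlen : j - a < ((l.drop a).take k).length := by
      simp [List.length_take, List.length_drop]; omega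
    have he : ((l.drop a).take k)[j - a]'hlen = x := by
      rw [List.getElem_take, List.getElem_drop]
      have hax : a + (j - a) = j := by omega
      simp only [hax]
      exact Option.some.inj hj
    exact he ▸ List.getElem_mem hlen

lemma window_iff (lst l : List Int) (i : Nat) (last : Int)
    (hin : i < lst.length) (h1 : l.length = lst.length)
    (h2 : ∀ j : Nat, i ≤ j → l[j]? = lst[j]?)
    (h3 : last = -10 ∨ (0 ≤ last ∧ last < (i : Int) ∧ l[last.toNat]? = some 1))
    (h4 : ∀ j : Nat, j < i → l[j]? = some 1 → (j : Int) ≤ last)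
    (hc1 : ¬ l[i]? = some 1) (hc0 : l[i]? = some 0) :
    ((1 : Int) ∉ PySem.List.slice l (some (max 0 ((i : Int) - 2)))
        (some (min (lst.length : Int) ((i : Int) + 3))))
    ↔ ((i : Int) - last > 2 ∧
        ((i : Int) + 1 ≥ (lst.length : Int) ∨ PySem.List.pyGet? lst ((i : Int) + 1) ≠ some 1) ∧
        ((i : Int) + 2 ≥ (lst.length : Int) ∨ PySem.List.pyGet? lst ((i : Int) + 2) ≠ some 1)) := by
  have hfwd1 : PySem.List.pyGet? lst ((i : Int) + 1) = lst[i + 1]? := by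
    rw [show ((i : Int) + 1) = (((i + 1 : Nat)) : Int) by push_cast; ring]
    simp only [PySem.List.pyGet?_natCast]
  have hfwd2 : PySem.List.pyGet? lst ((i : Int) + 2) = lst[i + 2]? := by
    rw [show ((i : Int) + 2) = (((i + 2 : Nat)) : Int) by push_cast; ring]
    simp only [PySem.List.pyGet?_natCast]
  have e1 : (max 0 ((i : Int) - 2)) = ((i - 2 : Nat) : Int) := by omega
  have e2 : (min (lst.length : Int) ((i : Int) + 3)) = ((min lst.length (i + 3) : Nat) : Int) := by omega
  rw [e1, e2, PySem.List.slice_natCast, mem_take_drop, hfwd1, hfwd2]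
  clear e1 e2 hfwd1 hfwd2
  constructor
  · intro hno
    refine ⟨?_, ?_, ?_⟩
    · by_contra hlast
      rcases h3 with h | ⟨hl0, hli, hl1⟩
      · omega
      · refine hno ⟨last.toNat, ?_, ?_, hl1⟩
        · omega
        · omega
    · by_cases hb : i + 1 < lst.length
      · right
        rw [← h2 (i + 1) (by omega)]
        intro hc
        exact hno ⟨i + 1, by omega, by omega, hc⟩
      · left; omega
    · by_cases hb : i + 2 < lst.length
      · right
        rw [← h2 (i + 2) (by omega)]
        intro hc
        exact hno ⟨i + 2, by omega, by omega, hc⟩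
      · left; omega
  · rintro ⟨hgap, hf1, hf2⟩ ⟨j, hj1, hj2, hj3⟩
    rcases Nat.lt_or_ge j i with hji | hji
    · have := h4 j hji hj3
      omega
    · have hcase : j = i ∨ j = i + 1 ∨ j = i + 2 := by omega
      rcases hcase with hc | hc | hc
      · subst hc; exact hc1 hj3
      · subst hc
        rcases hf1 with h | h
        · omega
        · rw [← h2 (i + 1) (by omega)] at h
          exact h hj3
      · subst hc
        rcases hf2 with h | h
        · omega
        · rw [← h2 (i + 2) (by omega)] at h
          exact h hj3

lemma loop_eq (lst : List Int) : ∀ (fuel i : Nat) (l : List Int) (last ans : Int),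
    lst.length ≤ i + fuel →
    l.length = lst.length →
    (∀ j : Nat, i ≤ j → l[j]? = lst[j]?) →
    (last = -10 ∨ (0 ≤ last ∧ last < (i : Int) ∧ l[last.toNat]? = some 1)) →
    (∀ j : Nat, j < i → l[j]? = some 1 → (j : Int) ≤ last) →
    msA_loop lst.length i l ans = msI_loop lst lst.length i last ans := by
  intro fuel
  induction fuel with
  | zero =>
    intro i l last ans hle h1 h2 h3 h4
    rw [msA_loop, msI_loop, dif_neg (by omega), dif_neg (by omega)]
  | succ f ih =>
    intro i l last ans hle h1 h2 h3 h4
    by_cases hin : i < lst.length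
    case neg => rw [msA_loop, msI_loop, dif_neg (by omega), dif_neg (by omega)]
    have hil : i < l.length := by omega
    have hgl : PySem.List.pyGet? l (i : Int) = l[i]? := by
      simp [PySem.List.pyGet?_natCast]
    have hglst : PySem.List.pyGet? lst (i : Int) = l[i]? := by
      simp [PySem.List.pyGet?_natCast, h2 i le_rfl]
    rw [msA_loop, msI_loop, dif_pos hin, dif_pos hin]
    by_cases hc1 : l[i]? = some 1
    · rw [if_neg (by rw [hgl, hc1]; simp), if_pos (by rw [hglst, hc1])]
      apply ih
      · omega
      · exact h1
      · intro j hj; exact h2 j (by omega)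
      · right
        refine ⟨by omega, by omega, ?_⟩
        simpa using hc1
      · intro j hj hj1
        rcases Nat.lt_succ_iff_lt_or_eq.mp hj with hlt | heq
        · have := h4 j hlt hj1
          rcases h3 with h | ⟨_, h, _⟩ <;> omega
        · omega
    · by_cases hc0 : l[i]? = some 0
      · have hcrux := window_iff lst l i last hin h1 h2 h3 h4 hc1 hc0
        by_cases hwin : ((i : Int) - last > 2 ∧
            ((i : Int) + 1 ≥ (lst.length : Int) ∨ PySem.List.pyGet? lst ((i : Int) + 1) ≠ some 1) ∧
            ((i : Int) + 2 ≥ (lst.length : Int) ∨ PySem.List.pyGet? lst ((i : Int) + 2) ≠ some 1))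
        · rw [if_pos ⟨by rw [hgl, hc0], hcrux.mpr hwin⟩,
              if_neg (by rw [hglst, hc0]; simp),
              if_pos ⟨by rw [hglst, hc0], hwin⟩]
          apply ih
          · omega
          · simpa using h1
          · intro j hj
            rw [List.getElem?_set_ne (by omega)]
            exact h2 j (by omega)
          · right
            refine ⟨by omega, by omega, ?_⟩
            have : ((i : Int)).toNat = i := by omega
            rw [this]
            simp [hil]
          · intro j hj _; omega
        · rw [if_neg (by rintro ⟨_, hm⟩; exact hwin (hcrux.mp hm)),
              if_neg (by rw [hglst, hc0]; simp),
              if_neg (by rintro ⟨_, hw⟩; exact hwin hw)]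
          apply ih
          · omega
          · exact h1
          · intro j hj; exact h2 j (by omega)
          · rcases h3 with h | ⟨a, b, c⟩
            · left; exact h
            · right; exact ⟨a, by omega, c⟩
          · intro j hj hj1
            rcases Nat.lt_succ_iff_lt_or_eq.mp hj with hlt | heq
            · exact h4 j hlt hj1
            · rw [heq] at hj1; rw [hj1] at hc1; exact absurd rfl hc1
      · rw [if_neg (by rw [hgl]; rintro ⟨h, _⟩; exact hc0 h),
            if_neg (by rw [hglst]; exact hc1),
            if_neg (by rw [hglst]; rintro ⟨h, _⟩; exact hc0 h)]
        apply ih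
        · omega
        · exact h1
        · intro j hj; exact h2 j (by omega)
        · rcases h3 with h | ⟨a, b, c⟩
          · left; exact h
          · right; exact ⟨a, by omega, c⟩
        · intro j hj hj1
          rcases Nat.lt_succ_iff_lt_or_eq.mp hj with hlt | heq
          · exact h4 j hlt hj1
          · rw [heq] at hj1; exact absurd hj1 hc1

-- Stage-1 invariant: nxt is the nearest 1-index ≥ i, acc the finished blocked values;
-- the result at every m < i is "an original 1 sits at m+1 or m+2".
lemma msB_blocked_elem (lst : List Int) : ∀ (i : Nat) (nxt : Option Nat) (acc : List Bool),
    (∀ j, nxt = some j → i ≤ j ∧ lst[j]? = some 1 ∧ ∀ k, i ≤ k → k < j → lst[k]? ≠ some 1) →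
    (nxt = none → ∀ k, i ≤ k → lst[k]? ≠ some 1) →
    ∀ m : Nat,
      (msB_blocked lst i nxt acc)[m]? =
        if m < i then some (decide (lst[m+1]? = some 1 ∨ lst[m+2]? = some 1)) else acc[m - i]? := by
  intro i
  induction i with
  | zero =>
    intro nxt acc _ _ m
    simp [msB_blocked]
  | succ i' ih =>
    intro nxt acc hsome hnone m
    have hstep : msB_blocked lst (i' + 1) nxt acc
        = msB_blocked lst i' (if lst[i']? = some 1 then some i' else nxt)
          ((nxt.elim false (fun j => decide (j - i' ≤ 2))) :: acc) := by
      cases nxt <;> rfl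
    rw [hstep]
    have hb : (nxt.elim false (fun j => decide (j - i' ≤ 2)))
        = decide (lst[i'+1]? = some 1 ∨ lst[i'+2]? = some 1) := by
      cases nxt with
      | none =>
        have h1 := hnone rfl (i' + 1) (by omega)
        have h2 := hnone rfl (i' + 2) (by omega)
        simp [h1, h2]
      | some j =>
        obtain ⟨hij, hj1, hmin⟩ := hsome j rfl
        by_cases hle : j - i' ≤ 2
        · have : j = i' + 1 ∨ j = i' + 2 := by omega
          rcases this with h | h <;> subst h <;> simp [hj1] <;> omega
        · have g1 : lst[i'+1]? ≠ some 1 := hmin (i' + 1) (by omega) (by omega)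
          have g2 : lst[i'+2]? ≠ some 1 := hmin (i' + 2) (by omega) (by omega)
          simp [g1, g2]; omega
    rw [ih _ _ ?_ ?_ m]
    · by_cases hm : m < i'
      · rw [if_pos hm, if_pos (by omega)]
      · by_cases hm' : m < i' + 1
        · have : m = i' := by omega
          subst this
          rw [if_neg hm, if_pos (by omega), Nat.sub_self, List.getElem?_cons_zero]
          exact congrArg some hb
        · rw [if_neg hm, if_neg hm']
          have : m - i' = (m - (i' + 1)) + 1 := by omega
          rw [this]
          simp
    · intro j hj
      by_cases h1 : lst[i']? = some 1
      · rw [if_pos h1] at hj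
        cases hj
        exact ⟨le_rfl, h1, by omega⟩
      · rw [if_neg h1] at hj
        obtain ⟨hij, hj1, hmin⟩ := hsome j hj
        refine ⟨by omega, hj1, ?_⟩
        intro k hk1 hk2
        by_cases hki : k = i'
        · subst hki; exact h1
        · exact hmin k (by omega) hk2
    · intro hn k hk
      by_cases h1 : lst[i']? = some 1
      · rw [if_pos h1] at hn; cases hn
      · rw [if_neg h1] at hn
        by_cases hki : k = i'
        · subst hki; exact h1
        · exact hnone hn k (by omega)

lemma msB_blocked_length (lst : List Int) : ∀ (i : Nat) (nxt : Option Nat) (acc : List Bool),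
    (msB_blocked lst i nxt acc).length = i + acc.length := by
  intro i
  induction i with
  | zero => intro nxt acc; simp [msB_blocked]
  | succ i' ih =>
    intro nxt acc
    have hstep : msB_blocked lst (i' + 1) nxt acc
        = msB_blocked lst i' (if lst[i']? = some 1 then some i' else nxt)
          ((nxt.elim false (fun j => decide (j - i' ≤ 2))) :: acc) := by
      cases nxt <;> rfl
    rw [hstep, ih]
    simp; omega

-- Stage 2 on the zipped list equals the last-index loop: cool = (last + 3 - i).toNat.
lemma count_eq_main (lst : List Int) (bl : List Bool)
    (hlen : bl.length = lst.length)
    (hbl : ∀ m : Nat, m < lst.length →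
      bl[m]? = some (decide (lst[m+1]? = some 1 ∨ lst[m+2]? = some 1))) :
    ∀ (fuel i : Nat) (last ans : Int),
      lst.length ≤ i + fuel → last < (i : Int) →
      msB_count ((lst.zip bl).drop i) (last + 3 - (i : Int)).toNat ans
        = msI_loop lst lst.length i last ans := by
  intro fuel
  induction fuel with
  | zero =>
    intro i last ans hle hlast
    rw [msI_loop, dif_neg (by omega)]
    rw [List.drop_eq_nil_of_le (by simp [List.length_zip, hlen]; omega)]
    rfl
  | succ f ih =>
    intro i last ans hle hlast
    by_cases hin : i < lst.length
    case neg =>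
      rw [msI_loop, dif_neg (by omega)]
      rw [List.drop_eq_nil_of_le (by simp [List.length_zip, hlen]; omega)]
      rfl
    have hiz : i < (lst.zip bl).length := by simp [List.length_zip, hlen]; omega
    rw [List.drop_eq_getElem_cons hiz]
    have hget : (lst.zip bl)[i]'hiz = (lst[i]'hin, bl[i]'(by omega)) := by
      simp [List.getElem_zip]
    rw [hget, msB_count, msI_loop, dif_pos hin]
    have hglst : PySem.List.pyGet? lst (i : Int) = some (lst[i]'hin) := by
      simp [PySem.List.pyGet?_natCast, List.getElem?_eq_getElem hin]
    have hbli : bl[i]'(by omega) = decide (lst[i+1]? = some 1 ∨ lst[i+2]? = some 1) := by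
      have := hbl i hin
      rw [List.getElem?_eq_getElem (by omega : i < bl.length)] at this
      exact Option.some.inj this
    have hfwd1 : PySem.List.pyGet? lst ((i : Int) + 1) = lst[i + 1]? := by
      rw [show ((i : Int) + 1) = (((i + 1 : Nat)) : Int) by push_cast; ring]
      simp only [PySem.List.pyGet?_natCast]
    have hfwd2 : PySem.List.pyGet? lst ((i : Int) + 2) = lst[i + 2]? := by
      rw [show ((i : Int) + 2) = (((i + 2 : Nat)) : Int) by push_cast; ring]
      simp only [PySem.List.pyGet?_natCast]
    by_cases hc1 : lst[i]'hin = 1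
    · rw [if_pos hc1, if_pos (by rw [hglst, hc1])]
      have : (2 : Nat) = ((i : Int) + 3 - ((i + 1 : Nat) : Int)).toNat := by push_cast; omega
      rw [this]
      exact ih (i + 1) (i : Int) ans (by omega) (by push_cast; omega)
    · rw [if_neg hc1, if_neg (show ¬ PySem.List.pyGet? lst (i : Int) = some 1 by
        rw [hglst]; intro h; exact hc1 (Option.some.inj h))]
      have hAcond : (PySem.List.pyGet? lst (i : Int) = some 0 ∧ (i : Int) - last > 2 ∧
            ((i : Int) + 1 ≥ (lst.length : Int) ∨ PySem.List.pyGet? lst ((i : Int) + 1) ≠ some 1) ∧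
            ((i : Int) + 2 ≥ (lst.length : Int) ∨ PySem.List.pyGet? lst ((i : Int) + 2) ≠ some 1))
          ↔ ((last + 3 - (i : Int)).toNat = 0 ∧ lst[i]'hin = 0 ∧
              decide (lst[i+1]? = some 1 ∨ lst[i+2]? = some 1) = false) := by
        rw [hglst, hfwd1, hfwd2]
        constructor
        · rintro ⟨h0, hgap, hf1, hf2⟩
          refine ⟨by omega, Option.some.inj h0, ?_⟩
          simp only [decide_eq_false_iff_not, not_or]
          constructor
          · rcases hf1 with h | h
            · simp [List.getElem?_eq_none (by omega : lst.length ≤ i + 1)]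
            · exact h
          · rcases hf2 with h | h
            · simp [List.getElem?_eq_none (by omega : lst.length ≤ i + 2)]
            · exact h
        · rintro ⟨hcool, h0, hblk⟩
          simp only [decide_eq_false_iff_not, not_or] at hblk
          exact ⟨by rw [h0], by omega, Or.inr hblk.1, Or.inr hblk.2⟩
      by_cases hA : PySem.List.pyGet? lst (i : Int) = some 0 ∧ (i : Int) - last > 2 ∧
            ((i : Int) + 1 ≥ (lst.length : Int) ∨ PySem.List.pyGet? lst ((i : Int) + 1) ≠ some 1) ∧
            ((i : Int) + 2 ≥ (lst.length : Int) ∨ PySem.List.pyGet? lst ((i : Int) + 2) ≠ some 1)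
      · obtain ⟨hcool, h0, hblk⟩ := hAcond.mp hA
        rw [if_pos hA, if_pos ⟨hcool, h0, by rw [hbli, hblk]⟩]
        have : (2 : Nat) = ((i : Int) + 3 - ((i + 1 : Nat) : Int)).toNat := by push_cast; omega
        rw [this]
        exact ih (i + 1) (i : Int) (ans + 1) (by omega) (by push_cast; omega)
      · rw [if_neg hA, if_neg (by
          rintro ⟨hcool, h0, hblk⟩
          rw [hbli] at hblk
          exact hA (hAcond.mpr ⟨hcool, h0, hblk⟩))]
        have : (last + 3 - (i : Int)).toNat - 1 = (last + 3 - ((i + 1 : Nat) : Int)).toNat := by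
          push_cast; omega
        rw [this]
        exact ih (i + 1) last ans (by omega) (by push_cast; omega)

-- ===== VERDICT (by name: the statement is the Claim_ definition above) =====
theorem maximum_seating_spec : Claim_equal_maximum_seating := by
  intro lst _
  unfold Spec_maximum_seating maximum_seating maximum_seating_alt
  rw [loop_eq lst lst.length 0 lst (-10) 0 (by omega) rfl (fun j _ => rfl) (Or.inl rfl)
      (fun j hj => by omega)]
  have hlen : (msB_blocked lst lst.length none []).length = lst.length := by
    rw [msB_blocked_length]; simp
  have hbl : ∀ m : Nat, m < lst.length →
      (msB_blocked lst lst.length none [])[m]? =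
        some (decide (lst[m+1]? = some 1 ∨ lst[m+2]? = some 1)) := by
    intro m hm
    rw [msB_blocked_elem lst lst.length none []
      (fun j hj => by cases hj)
      (fun _ k hk => by simp [List.getElem?_eq_none hk]) m, if_pos hm]
  have h2 := count_eq_main lst (msB_blocked lst lst.length none []) hlen hbl lst.length 0 (-10) 0
    (by omega) (by norm_num)
  rw [List.drop_zero,
    show ((-10 : Int) + 3 - ((0 : Nat) : Int)).toNat = 0 by decide] at h2
  exact h2.symm
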